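-- pv_equiv track=rewrite | github.com/leye195/algorithm-coding | 알고리즘 문제풀이/기타/mukabang.py | solution
-- ===== SOURCE A (Python) =====
-- def solution(food_times,k):
--     s_times=sorted(food_times)#sorted food_times
--     l_times=len(food_times)#length of food_times
--     d_time=0#사용 시간
--     l_idx=0
--     for idx in range(l_times):
--         if idx==0:
--             d_time+=s_times[idx]*(l_times-idx)
--         else:
--             d_time+=(s_times[idx]-s_times[idx-1])*(l_times-idx)
--         if d_time>k:
--             l_idx=idx-1
--             break
--     if d_time<=k:
--         return -1
--     lst=[]
--     for idx in range(l_times-1,-1,-1):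
--         if food_times[idx]>s_times[l_idx]:
--             lst.append(idx+1)
--     if len(lst)!=0:
--         return lst[(d_time-k-1)%len(lst)]
--     else:
--         return k%l_times+1
-- ===== SOURCE B (Python) =====
-- def solution(food_times, k):
--     # live pool of (time, original_index) pairs; repeatedly extract the minimum
--     # (heap-style consumption) instead of sorting the whole list up front.
--     pending = [(t, i) for i, t in enumerate(food_times)]
--     rem, prev = k, 0
--     while pending:
--         t, i = min(pending)
--         cost = (t - prev) * len(pending)
--         if rem < cost:
--             survivors = sorted(idx for _, idx in pending)
--             return survivors[rem % len(survivors)] + 1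
--         rem -= cost
--         prev = t
--         pending.remove((t, i))
--     return -1
-- ===== Notes on version B (the rewrite author's own statement) =====
-- stated objective: alternative
-- what changed: B replaces A's global sort plus cumulative-time scan with break, backward survivor filter and (d_time-k-1) modular trick by heap-style repeated minimum extraction from a live pool of (time, index) pairs, consuming the budget level by level and, when it runs out, returning sorted-surviving-pool[rem % size] + 1.
import Mathlib
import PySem

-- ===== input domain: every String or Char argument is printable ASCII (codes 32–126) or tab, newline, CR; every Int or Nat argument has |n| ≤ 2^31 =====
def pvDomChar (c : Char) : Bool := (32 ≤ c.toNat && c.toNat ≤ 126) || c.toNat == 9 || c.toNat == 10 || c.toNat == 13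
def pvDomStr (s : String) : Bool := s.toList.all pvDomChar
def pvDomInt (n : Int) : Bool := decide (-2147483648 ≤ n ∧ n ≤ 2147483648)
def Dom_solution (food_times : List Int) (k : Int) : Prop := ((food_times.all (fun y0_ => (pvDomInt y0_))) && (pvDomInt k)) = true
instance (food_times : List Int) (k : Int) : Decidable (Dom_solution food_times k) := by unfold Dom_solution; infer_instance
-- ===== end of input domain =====

-- B replaces A's global-sort + cumulative-time scan + backward filter + (d_time-k-1) modular trick
-- by heap-style repeated minimum extraction from a live pool of (time, index) pairs; return values
-- proved equal on Pre_solution.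

-- ===== PORT A =====
-- first for-loop of A: state (d_time, l_idx, broke); the break is modelled by the Bool flag
def solLoopA (s_times : List Int) (l_times : Nat) (k : Int) : List Int → Int × Int × Bool → Int × Int × Bool
  | [], st => st
  | idx :: rest, (d_time, l_idx, _) =>
    let d' := if idx = 0
      then d_time + PySem.List.pyGetD s_times idx 0 * ((l_times : Int) - idx)
      else d_time + (PySem.List.pyGetD s_times idx 0 - PySem.List.pyGetD s_times (idx - 1) 0) * ((l_times : Int) - idx)
    if d' > k then (d', idx - 1, true)
    else solLoopA s_times l_times k rest (d', l_idx, false)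

-- A's code after the first loop (st = (d_time, l_idx, broke)); the l_idx index may be -1 (Python
-- negative indexing, handled by pyGetD); pyGetD defaults are never reached on Pre_solution
def solPost (food_times s_times : List Int) (l_times : Nat) (k : Int) (st : Int × Int × Bool) : Int :=
  if st.1 ≤ k then -1
  else
    let lst := (PySem.List.pyRange ((l_times : Int) - 1) (-1) (-1)).foldl
      (fun acc idx => if PySem.List.pyGetD food_times idx 0 > PySem.List.pyGetD s_times st.2.1 0
                      then acc ++ [idx + 1] else acc) []
    if lst.length ≠ 0 then PySem.List.pyGetD lst (PySem.Int.mod (st.1 - k - 1) (lst.length : Int)) 0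
    else PySem.Int.mod k (l_times : Int) + 1

def solution (food_times : List Int) (k : Int) : Int :=
  let s_times := PySem.List.sorted food_times (fun x => x) false
  let l_times := food_times.length
  solPost food_times s_times l_times k
    (solLoopA s_times l_times k (PySem.List.pyRange 0 (l_times : Int) 1) (0, 0, false))

-- ===== PORT B =====
-- min(pending) over Python tuples: first lexicographically smallest pair (strict compare keeps the earliest)
def pvPoolMin (m : Int × Int) : List (Int × Int) → Int × Int
  | [] => m
  | x :: r => pvPoolMin (if x.1 < m.1 ∨ (x.1 = m.1 ∧ x.2 < m.2) then x else m) r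

-- membership of the minimum (cited by altLoop's decreasing_by)
theorem pvPoolMin_mem (l : List (Int × Int)) : ∀ m, pvPoolMin m l ∈ m :: l := by
  induction l with
  | nil => intro m; simp [pvPoolMin]
  | cons x r ih =>
    intro m
    simp only [pvPoolMin]
    rcases List.mem_cons.mp (ih (if x.1 < m.1 ∨ (x.1 = m.1 ∧ x.2 < m.2) then x else m)) with h1 | h1
    · rw [h1]; split <;> simp
    · simp [h1]

-- B's while-loop: peek the minimal pair, either stop (survivors = sorted indices of the pool) or
-- consume the level cost and remove that pair (pending.remove)
def altLoop (rem prev : Int) : List (Int × Int) → Int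
  | [] => -1
  | x :: rest =>
    let m := pvPoolMin x rest
    let cost := (m.1 - prev) * (((x :: rest).length : Nat) : Int)
    if rem < cost then
      let survivors := PySem.List.sorted ((x :: rest).map Prod.snd) (fun y => y) false
      PySem.List.pyGetD survivors (PySem.Int.mod rem ((survivors.length : Nat) : Int)) 0 + 1
    else altLoop (rem - cost) m.1 ((PySem.List.remove? (x :: rest) m).getD [])
termination_by pool => pool.length
decreasing_by
  rw [PySem.List.remove?_eq_some_erase _ _ (pvPoolMin_mem rest x), Option.getD_some,
    List.length_erase_of_mem (pvPoolMin_mem rest x)]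
  simp

def solution_alt (food_times : List Int) (k : Int) : Int :=
  altLoop k 0 ((PySem.List.enumerate food_times 0).map (fun q => (q.2, q.1)))

-- ===== PRECONDITION & SPEC =====
-- Pre_ excludes only empty food_times with k < 0, where A raises ZeroDivisionError (k % 0).
def Pre_solution (food_times : List Int) (k : Int) : Prop := food_times = [] → 0 ≤ k
instance (food_times : List Int) (k : Int) : Decidable (Pre_solution food_times k) := by
  unfold Pre_solution; infer_instance
def pvWitness_solution : List Int × Int := ([3, 1, 2], 5)

def Spec_solution (food_times : List Int) (k : Int) (out : Int) : Prop := out = solution_alt food_times k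
instance (food_times : List Int) (k : Int) (out : Int) : Decidable (Spec_solution food_times k out) := by
  unfold Spec_solution; infer_instance

-- ===== CLAIM (what is proved, stated in full; the proofs are below) =====
def Claim_equal_solution : Prop := ∀ (food_times : List Int) (k : Int), Dom_solution food_times k → Pre_solution food_times k → Spec_solution food_times k (solution food_times k)

-- ===== LEMMAS AND PROOFS =====

-- reference loop used only by the proofs: B's consumption re-expressed as a walk over
-- enumerate(sorted(food_times)); the bridge lemmas below identify altLoop with it
def pvRefLoop (food_times : List Int) (n : Nat) : List (Int × Int) → Int → Int → Int
  | [], _, _ => -1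
  | (i, t) :: rest, rem, prev =>
    let cost := (t - prev) * ((n : Int) - i)
    if rem < cost then
      let survivors := ((PySem.List.enumerate food_times 0).filter (fun p => t ≤ p.2)).map (fun p => p.1)
      PySem.List.pyGetD survivors (PySem.Int.mod rem (survivors.length : Int)) 0 + 1
    else pvRefLoop food_times n rest (rem - cost) t

theorem pv_sorted_mono (l : List Int) {p q : Nat} (hpq : p ≤ q)
    (hq : q < (PySem.List.sorted l (fun x => x) false).length) :
    (PySem.List.sorted l (fun x => x) false)[p]'(lt_of_le_of_lt hpq hq) ≤
      (PySem.List.sorted l (fun x => x) false)[q] :=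
  PySem.List.sorted_id_getElem_mono l hpq hq

theorem pv_sorted_cut (l : List Int) (i : Nat) (h0 : 0 < i)
    (hi : i < (PySem.List.sorted l (fun x => x) false).length)
    (hlt : (PySem.List.sorted l (fun x => x) false)[i-1]'(by omega) <
           (PySem.List.sorted l (fun x => x) false)[i])
    (x : Int) (hx : x ∈ PySem.List.sorted l (fun x => x) false) :
    ((PySem.List.sorted l (fun x => x) false)[i-1]'(by omega) < x ↔
     (PySem.List.sorted l (fun x => x) false)[i] ≤ x) := by
  obtain ⟨p, hp, rfl⟩ := List.mem_iff_getElem.mp hx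
  constructor
  · intro h
    rcases Nat.lt_or_ge p i with hpi | hpi
    · have hle := pv_sorted_mono l (show p ≤ i - 1 by omega) (show i - 1 < _ by omega)
      omega
    · exact pv_sorted_mono l hpi hp
  · intro h
    exact lt_of_lt_of_le hlt h

theorem pv_le_getLast (l : List Int) (x : Int)
    (hx : x ∈ PySem.List.sorted l (fun x => x) false)
    (h : PySem.List.sorted l (fun x => x) false ≠ []) :
    x ≤ (PySem.List.sorted l (fun x => x) false).getLast h := by
  obtain ⟨p, hp, rfl⟩ := List.mem_iff_getElem.mp hx
  rw [List.getLast_eq_getElem]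
  exact pv_sorted_mono l (show p ≤ _ - 1 by omega) (by omega)

theorem pv_head_le (l : List Int) (x : Int)
    (hx : x ∈ PySem.List.sorted l (fun x => x) false)
    (h : 0 < (PySem.List.sorted l (fun x => x) false).length) :
    (PySem.List.sorted l (fun x => x) false)[0] ≤ x := by
  obtain ⟨p, hp, rfl⟩ := List.mem_iff_getElem.mp hx
  exact pv_sorted_mono l (Nat.zero_le p) hp

theorem pv_mod_flip (q m Δ : Int) (hm : 0 < m) :
    PySem.Int.mod (Δ * m - q - 1) m = m - 1 - PySem.Int.mod q m := by
  have h1 := PySem.Int.mod_nonneg q hm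
  have h2 := PySem.Int.mod_lt q hm
  rw [PySem.Int.mod_eq_emod_of_pos hm] at h1 h2 ⊢
  rw [PySem.Int.mod_eq_emod_of_pos hm]
  have hq := Int.ediv_add_emod q m
  have h3 : Δ * m - q - 1 = (m - 1 - q % m) + (Δ - 1 - q / m) * m := by linear_combination hq
  rw [h3, Int.add_mul_emod_self_right]
  exact Int.emod_eq_of_lt (by omega) (by omega)

theorem pv_filter_eq (ft : List Int) (n : Nat) (hn : n = ft.length) (i : Nat) (h0 : 0 < i)
    (hi : i < (PySem.List.sorted ft (fun x => x) false).length)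
    (hlt : (PySem.List.sorted ft (fun x => x) false)[i-1]'(by omega) <
           (PySem.List.sorted ft (fun x => x) false)[i]) :
    (PySem.List.pyRange 0 (n:Int) 1).filter
      (fun j => decide ((PySem.List.sorted ft (fun x => x) false)[i-1]'(by omega) < PySem.List.pyGetD ft j 0))
    = (PySem.List.pyRange 0 (n:Int) 1).filter
      (fun j => decide ((PySem.List.sorted ft (fun x => x) false)[i] ≤ PySem.List.pyGetD ft j 0)) := by
  apply List.filter_congr
  intro j hj
  obtain ⟨hj0, hj1⟩ := PySem.List.mem_pyRange_one.mp hj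
  have hmem : PySem.List.pyGetD ft j 0 ∈ PySem.List.sorted ft (fun x => x) false := by
    rw [PySem.List.mem_sorted]
    rw [PySem.List.pyGetD_eq_getElem ft 0 hj0 (by omega)]
    exact List.getElem_mem _
  simp only [decide_eq_decide]
  exact pv_sorted_cut ft i h0 hi hlt _ hmem

theorem pv_count (ft : List Int) (n : Nat) (hn : n = ft.length) (i : Nat)
    (hi : i < (PySem.List.sorted ft (fun x => x) false).length)
    (hup : ∀ x ∈ (PySem.List.sorted ft (fun x => x) false).take i,
            ¬ (PySem.List.sorted ft (fun x => x) false)[i] ≤ x) :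
    ((PySem.List.pyRange 0 (n:Int) 1).filter
      (fun j => decide ((PySem.List.sorted ft (fun x => x) false)[i] ≤ PySem.List.pyGetD ft j 0))).length
    = n - i := by
  subst hn
  have hslen : (PySem.List.sorted ft (fun x => x) false).length = ft.length :=
    PySem.List.length_sorted ft (fun x => x) false
  set t := (PySem.List.sorted ft (fun x => x) false)[i] with ht
  rw [← List.countP_eq_length_filter]
  have h1 : (PySem.List.pyRange 0 (ft.length:Int) 1).countP (fun j => decide (t ≤ PySem.List.pyGetD ft j 0))
      = ((PySem.List.pyRange 0 (ft.length:Int) 1).map (fun j => PySem.List.pyGetD ft j 0)).countP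
          (fun x => decide (t ≤ x)) := by
    rw [List.countP_map]; rfl
  rw [h1, PySem.List.map_pyGetD_pyRange_zero' ft 0]
  rw [← (PySem.List.sorted_perm ft (fun x => x) false).countP_eq]
  conv_lhs => rw [← List.take_append_drop i (PySem.List.sorted ft (fun x => x) false)]
  rw [List.countP_append]
  have hz : (List.countP (fun x => decide (t ≤ x)) ((PySem.List.sorted ft (fun x => x) false).take i)) = 0 := by
    rw [List.countP_eq_zero]
    intro a ha
    simpa using hup a ha
  have hful : (List.countP (fun x => decide (t ≤ x)) ((PySem.List.sorted ft (fun x => x) false).drop i))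
      = ((PySem.List.sorted ft (fun x => x) false).drop i).length := by
    rw [List.countP_eq_length]
    intro a ha
    obtain ⟨j, hj, rfl⟩ := List.mem_iff_getElem.mp ha
    rw [List.getElem_drop]
    simp only [decide_eq_true_eq]
    have hj' : j < ((PySem.List.sorted ft (fun x => x) false).drop i).length := hj
    rw [List.length_drop] at hj'
    exact pv_sorted_mono ft (Nat.le_add_right i j) (by omega)
  rw [hz, hful, List.length_drop, hslen]
  omega

theorem pv_surv_eq (ft : List Int) (n : Nat) (hn : n = ft.length) (t : Int) :
    ((PySem.List.enumerate ft 0).filter (fun p => t ≤ p.2)).map (fun p => p.1)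
    = (PySem.List.pyRange 0 (n:Int) 1).filter (fun j => decide (t ≤ PySem.List.pyGetD ft j 0)) := by
  subst hn
  rw [PySem.List.enumerate_eq_map_pyRange ft 0, PySem.List.len_eq]
  rw [List.filter_map, List.map_map]
  have h1 : ((fun p : Int × Int => p.1) ∘ fun j => (j, PySem.List.pyGetD ft j 0)) = fun j => j := by
    funext j; rfl
  have h2 : ((fun p : Int × Int => decide (t ≤ p.2)) ∘ fun j => (j, PySem.List.pyGetD ft j 0))
      = fun j => decide (t ≤ PySem.List.pyGetD ft j 0) := by
    funext j; rfl
  rw [h1, h2, List.map_id']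

theorem pv_hup (ft : List Int) (n : Nat) (hn : n = ft.length) (i : Nat) (h0 : 0 < i) (hi : i < n)
    (hgap : (PySem.List.sorted ft (fun x => x) false)[i-1]'(by rw [PySem.List.length_sorted]; omega) <
            (PySem.List.sorted ft (fun x => x) false)[i]'(by rw [PySem.List.length_sorted]; omega)) :
    ∀ x ∈ (PySem.List.sorted ft (fun x => x) false).take i,
      ¬ (PySem.List.sorted ft (fun x => x) false)[i]'(by rw [PySem.List.length_sorted]; omega) ≤ x := by
  have hslen : (PySem.List.sorted ft (fun x => x) false).length = n := by
    rw [PySem.List.length_sorted]; omega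
  intro x hx
  obtain ⟨j, hj, rfl⟩ := List.mem_iff_getElem.mp hx
  rw [List.getElem_take]
  have hjlt : j < i := by
    have := hj; rw [List.length_take] at this; omega
  have hle := pv_sorted_mono ft (show j ≤ i - 1 by omega) (show i - 1 < _ by omega)
  omega

theorem pv_gap (a b q c : Int) (hq : 0 ≤ q) (hc : 0 ≤ c) (hqc : q < (b - a) * c) : a < b := by
  by_contra h
  push_neg at h
  nlinarith

theorem pv_A_break_zero (ft : List Int) (k : Int) (n : Nat) (hn : n = ft.length) (hn0 : 0 < n)
    (d' li : Int) (hli : li = -1) (hbig : k < d') :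
    solPost ft (PySem.List.sorted ft (fun x => x) false) n k (d', li, true)
    = PySem.Int.mod k (n:Int) + 1 := by
  subst hli
  unfold solPost
  rw [if_neg (by simp; omega)]
  rw [PySem.List.foldl_append_ite
    (p := fun idx => PySem.List.pyGetD ft idx 0 > PySem.List.pyGetD (PySem.List.sorted ft (fun x => x) false) (-1) 0)
    (f := fun idx => idx + 1)]
  rw [PySem.List.pyRange_neg_one_eq_reverse]
  rw [show ((-1:Int)+1) = 0 by norm_num]
  rw [List.filter_reverse]
  have hne : PySem.List.sorted ft (fun x => x) false ≠ [] := by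
    rw [← List.length_pos_iff, PySem.List.length_sorted]; omega
  have hfn : List.filter
      (fun x => decide (PySem.List.pyGetD ft x 0 > PySem.List.pyGetD (PySem.List.sorted ft (fun x => x) false) (-1) 0))
      (PySem.List.pyRange 0 ((n:Int) - 1 + 1)) = [] := by
    rw [List.filter_eq_nil_iff]
    intro j hj
    obtain ⟨hj0, hj1⟩ := PySem.List.mem_pyRange_one.mp hj
    have hmem : PySem.List.pyGetD ft j 0 ∈ PySem.List.sorted ft (fun x => x) false := by
      rw [PySem.List.mem_sorted, PySem.List.pyGetD_eq_getElem ft 0 hj0 (by omega)]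
      exact List.getElem_mem _
    rw [PySem.List.pyGetD_neg_one _ _ hne]
    simpa using pv_le_getLast ft _ hmem hne
  rw [hfn]
  simp

theorem pv_ref_break_zero (ft : List Int) (k : Int) (n : Nat) (hn : n = ft.length) (hn0 : 0 < n)
    (t : Int) (ht : t = (PySem.List.sorted ft (fun x => x) false)[0]'(by rw [PySem.List.length_sorted]; omega)) :
    PySem.List.pyGetD (((PySem.List.enumerate ft 0).filter (fun p => t ≤ p.2)).map (fun p => p.1))
      (PySem.Int.mod k (((((PySem.List.enumerate ft 0).filter (fun p => t ≤ p.2)).map (fun p => p.1)).length : Nat) : Int)) 0 + 1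
    = PySem.Int.mod k (n:Int) + 1 := by
  have hsel : (PySem.List.enumerate ft 0).filter (fun p => t ≤ p.2) = PySem.List.enumerate ft 0 := by
    rw [List.filter_eq_self]
    intro p hp
    obtain ⟨j, hj, rfl⟩ := (PySem.List.mem_enumerate_iff _ _ _).mp hp
    simp only [decide_eq_true_eq]
    subst ht
    exact pv_head_le ft _ (by rw [PySem.List.mem_sorted]; exact List.getElem_mem _) _
  rw [hsel, PySem.List.map_fst_enumerate]
  rw [show ((0:Int) + ↑ft.length) = ((n:Nat):Int) by omega]
  have hmn := PySem.Int.mod_nonneg k (show (0:Int) < (n:Int) by omega)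
  have hml := PySem.Int.mod_lt k (show (0:Int) < (n:Int) by omega)
  rw [PySem.List.length_pyRange_one]
  rw [show (((((n:Nat):Int) - 0).toNat : Nat) : Int) = (n:Int) by omega]
  rw [PySem.List.pyGetD_eq_getElem _ 0 hmn (by rw [PySem.List.length_pyRange_one]; omega)]
  rw [PySem.List.getElem_pyRange_one]
  omega

theorem pv_A_break_pos (ft : List Int) (k : Int) (n : Nat) (hn : n = ft.length)
    (i : Nat) (h0 : 0 < i) (hi : i < n) (d d' li : Int)
    (hdk : d ≤ k)
    (hli : li = (i:Int) - 1)
    (hd' : d' = d + ((PySem.List.sorted ft (fun x => x) false)[i]'(by rw [PySem.List.length_sorted]; omega)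
                     - (PySem.List.sorted ft (fun x => x) false)[i-1]'(by rw [PySem.List.length_sorted]; omega))
                    * ((n:Int) - (i:Int)))
    (hbig : k < d') :
    solPost ft (PySem.List.sorted ft (fun x => x) false) n k (d', li, true)
    = PySem.List.pyGetD
        ((PySem.List.pyRange 0 (n:Int) 1).filter
          (fun j => decide ((PySem.List.sorted ft (fun x => x) false)[i]'(by rw [PySem.List.length_sorted]; omega) ≤ PySem.List.pyGetD ft j 0)))
        (PySem.Int.mod (k - d) (((n - i : Nat) : Nat) : Int)) 0 + 1 := by
  have hslen : (PySem.List.sorted ft (fun x => x) false).length = n := by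
    rw [PySem.List.length_sorted]; omega
  have hcost : (0:Int) < ((PySem.List.sorted ft (fun x => x) false)[i]'(by omega)
                     - (PySem.List.sorted ft (fun x => x) false)[i-1]'(by omega)) * ((n:Int) - (i:Int)) := by
    linarith [hd' ▸ hbig]
  have hgap : (PySem.List.sorted ft (fun x => x) false)[i-1]'(by omega) <
      (PySem.List.sorted ft (fun x => x) false)[i]'(by omega) := by
    by_contra h
    push_neg at h
    have h2 : (0:Int) ≤ (n:Int) - (i:Int) := by omega
    nlinarith [hcost]
  subst hli
  unfold solPost
  rw [if_neg (by simp; omega)]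
  rw [PySem.List.foldl_append_ite
    (p := fun idx => PySem.List.pyGetD ft idx 0 > PySem.List.pyGetD (PySem.List.sorted ft (fun x => x) false) ((i:Int) - 1) 0)
    (f := fun idx => idx + 1)]
  rw [PySem.List.pyRange_neg_one_eq_reverse]
  rw [show ((-1:Int)+1) = 0 by norm_num, show ((n:Int) - 1 + 1) = (n:Int) by ring]
  rw [List.filter_reverse, List.map_reverse]
  have hthr : PySem.List.pyGetD (PySem.List.sorted ft (fun x => x) false) ((i:Int) - 1) 0
      = (PySem.List.sorted ft (fun x => x) false)[i-1]'(by omega) := by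
    rw [PySem.List.pyGetD_eq_getElem _ 0 (by omega) (by omega)]
    simp only [show ((i:Int) - 1).toNat = i - 1 by omega]
  simp only [gt_iff_lt, hthr]
  rw [pv_filter_eq ft n hn i h0 (by omega) hgap]
  have hup : ∀ x ∈ (PySem.List.sorted ft (fun x => x) false).take i,
      ¬ (PySem.List.sorted ft (fun x => x) false)[i]'(by omega) ≤ x := by
    intro x hx
    obtain ⟨j, hj, rfl⟩ := List.mem_iff_getElem.mp hx
    rw [List.getElem_take]
    have hjlt : j < i := by
      have := hj; rw [List.length_take] at this; omega
    have hle := pv_sorted_mono ft (show j ≤ i - 1 by omega) (show i - 1 < _ by omega)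
    omega
  have hFlen := pv_count ft n hn i (by omega) hup
  simp only [List.nil_append, List.length_reverse, List.length_map, hFlen]
  rw [if_pos (by omega)]
  have harith : d' - k - 1 = ((PySem.List.sorted ft (fun x => x) false)[i]'(by omega)
                     - (PySem.List.sorted ft (fun x => x) false)[i-1]'(by omega)) * (((n - i : Nat) : Nat) : Int) - (k - d) - 1 := by
    rw [hd']
    push_cast [Nat.cast_sub (le_of_lt hi)]
    ring
  rw [harith, pv_mod_flip (k - d) _ _ (by omega)]
  have hr0 := PySem.Int.mod_nonneg (k - d) (show (0:Int) < (((n - i : Nat) : Nat) : Int) by omega)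
  have hr1 := PySem.Int.mod_lt (k - d) (show (0:Int) < (((n - i : Nat) : Nat) : Int) by omega)
  rw [PySem.List.pyGetD_eq_getElem _ 0 (by omega)
      (by simp only [List.length_reverse, List.length_map, hFlen]; omega)]
  rw [PySem.List.pyGetD_eq_getElem _ 0 hr0 (by rw [hFlen]; omega)]
  rw [List.getElem_reverse]
  simp only [List.length_map, hFlen]
  have hidx : (n - i) - 1 - ((((n - i : Nat) : Nat) : Int) - 1 - PySem.Int.mod (k - d) (((n - i : Nat) : Nat) : Int)).toNat
      = (PySem.Int.mod (k - d) (((n - i : Nat) : Nat) : Int)).toNat := by omega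
  simp only [hidx]
  rw [List.getElem_map]

theorem pv_loop_eq (ft : List Int) (k : Int) (n : Nat) (hn : n = ft.length) (hn0 : 0 < n) :
    ∀ (m i : Nat) (d li : Int), n - i = m → (hin : i ≤ n) →
    (i = 0 → d = 0) → (0 < i → d ≤ k) →
    solPost ft (PySem.List.sorted ft (fun x => x) false) n k
      (solLoopA (PySem.List.sorted ft (fun x => x) false) n k
        (PySem.List.pyRange (i : Int) (n : Int) 1) (d, li, false))
    = pvRefLoop ft n ((PySem.List.enumerate (PySem.List.sorted ft (fun x => x) false) 0).drop i)
        (k - d)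
        (if i = 0 then 0 else (PySem.List.sorted ft (fun x => x) false)[i-1]'(by
          rw [PySem.List.length_sorted]; omega)) := by
  have hslen : (PySem.List.sorted ft (fun x => x) false).length = n := by
    rw [PySem.List.length_sorted]; omega
  intro m
  induction m with
  | zero =>
    intro i d li hm hin h0 hpos
    have hieq : i = n := by omega
    subst hieq
    rw [PySem.List.pyRange_one_eq_nil (by omega)]
    simp only [solLoopA]
    have hdrop : (PySem.List.enumerate (PySem.List.sorted ft (fun x => x) false) 0).drop i = [] := by
      apply List.drop_eq_nil_of_le
      rw [PySem.List.length_enumerate, hslen]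
    rw [hdrop]
    have hdk : d ≤ k := hpos (by omega)
    simp only [pvRefLoop, solPost]
    rw [if_pos hdk]
  | succ m ih =>
    intro i d li hm hin h0 hpos
    have hi : i < n := by omega
    rw [PySem.List.pyRange_one_cons (show (i:Int) < (n:Int) by omega)]
    rw [List.drop_eq_getElem_cons (show i < (PySem.List.enumerate (PySem.List.sorted ft (fun x => x) false) 0).length by
      rw [PySem.List.length_enumerate, hslen]; omega)]
    rw [PySem.List.getElem_enumerate]
    simp only [solLoopA, pvRefLoop, zero_add]
    by_cases hi0 : i = 0
    · subst hi0
      have hd0 : d = 0 := h0 rfl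
      subst hd0
      simp only [Nat.cast_zero, zero_sub, sub_zero, zero_add, gt_iff_lt, ↓reduceIte]
      have hs0 : PySem.List.pyGetD (PySem.List.sorted ft (fun x => x) false) 0 0
          = (PySem.List.sorted ft (fun x => x) false)[0]'(by omega) := by
        rw [PySem.List.pyGetD_eq_getElem _ 0 (by omega) (by omega)]
        simp only [Int.toNat_zero]
      rw [hs0]
      split_ifs with h1
      · rw [pv_A_break_zero ft k n hn (by omega) _ _ rfl (by linarith)]
        exact (pv_ref_break_zero ft k n hn (by omega) _ rfl).symm
      · have hrec := ih 1 ((PySem.List.sorted ft (fun x => x) false)[0]'(by omega) * (n:Int)) li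
          (by omega) (by omega) (by omega) (fun _ => by linarith)
        simp only [Nat.cast_one] at hrec
        rw [if_neg (by omega : ¬ (1:Nat) = 0)] at hrec
        simp only [Nat.sub_self] at hrec
        exact hrec
    · have hd : 0 < i := Nat.pos_of_ne_zero hi0
      have hdk := hpos hd
      rw [if_neg (by omega : ¬ ((i:Nat):Int) = 0), if_neg hi0]
      have hsi : PySem.List.pyGetD (PySem.List.sorted ft (fun x => x) false) ((i:Nat):Int) 0
          = (PySem.List.sorted ft (fun x => x) false)[i]'(by omega) := by
        rw [PySem.List.pyGetD_eq_getElem _ 0 (by omega) (by omega)]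
        simp only [Int.toNat_natCast]
      have hsi1 : PySem.List.pyGetD (PySem.List.sorted ft (fun x => x) false) (((i:Nat):Int) - 1) 0
          = (PySem.List.sorted ft (fun x => x) false)[i-1]'(by omega) := by
        rw [PySem.List.pyGetD_eq_getElem _ 0 (by omega) (by omega)]
        simp only [show (((i:Nat):Int) - 1).toNat = i - 1 from by omega]
      rw [hsi, hsi1]
      simp only [gt_iff_lt]
      split_ifs with h1 h2
      · have hgap : (PySem.List.sorted ft (fun x => x) false)[i-1]'(by omega) <
            (PySem.List.sorted ft (fun x => x) false)[i]'(by omega) :=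
          pv_gap ((PySem.List.sorted ft (fun x => x) false)[i-1]'(by omega))
            ((PySem.List.sorted ft (fun x => x) false)[i]'(by omega))
            (k - d) ((n:Int) - (i:Int)) (by omega) (by omega) (by linarith)
        rw [pv_A_break_pos ft k n hn i hd hi d _ _ hdk rfl rfl (by linarith)]
        rw [pv_surv_eq ft n hn _]
        rw [pv_count ft n hn i (by omega) (pv_hup ft n hn i hd hi hgap)]
      · exact absurd h2 (by linarith)
      · exact absurd h1 (by linarith)
      · have hrec := ih (i+1)
          (d + ((PySem.List.sorted ft (fun x => x) false)[i]'(by omega) -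
                (PySem.List.sorted ft (fun x => x) false)[i-1]'(by omega)) * ((n:Int) - (i:Int))) li
          (by omega) (by omega) (by omega) (fun _ => by linarith)
        push_cast at hrec
        rw [sub_sub]
        exact hrec

theorem pvPoolMin_le (l : List (Int × Int)) : ∀ m y, y ∈ m :: l → (pvPoolMin m l).1 ≤ y.1 := by
  induction l with
  | nil =>
    intro m y hy
    simp only [List.mem_singleton] at hy
    simp [pvPoolMin, hy]
  | cons x r ih =>
    intro m y hy
    simp only [pvPoolMin]
    set m' := if x.1 < m.1 ∨ (x.1 = m.1 ∧ x.2 < m.2) then x else m with hm'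
    have hAB : m'.1 ≤ m.1 ∧ m'.1 ≤ x.1 := by
      rw [hm']
      split_ifs with h
      · exact ⟨by omega, le_refl _⟩
      · exact ⟨le_refl _, by omega⟩
    have hself : (pvPoolMin m' r).1 ≤ m'.1 := ih m' m' List.mem_cons_self
    rcases List.mem_cons.mp hy with h1 | h1
    · exact h1 ▸ le_trans hself hAB.1
    rcases List.mem_cons.mp h1 with h2 | h2
    · exact h2 ▸ le_trans hself hAB.2
    · exact ih m' y (List.mem_cons_of_mem _ h2)

-- the surviving pool, sorted by index, is exactly the reference loop's survivor list
theorem pv_pool_surv (ft : List Int) (n : Nat) (hn : n = ft.length) (p : Nat) (hp : p < n)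
    (pool : List (Int × Int))
    (hperm : (pool.map Prod.fst).Perm ((PySem.List.sorted ft (fun x => x) false).drop p))
    (hcount : ∀ x : Int × Int,
      pool.count x ≤ ((PySem.List.enumerate ft 0).map (fun q => (q.2, q.1))).count x)
    (hup : ∀ x ∈ (PySem.List.sorted ft (fun x => x) false).take p,
      ¬ (PySem.List.sorted ft (fun x => x) false)[p]'(by rw [PySem.List.length_sorted]; omega) ≤ x) :
    PySem.List.sorted (pool.map Prod.snd) (fun y => y) false
    = ((PySem.List.enumerate ft 0).filter
        (fun q => (PySem.List.sorted ft (fun x => x) false)[p]'(by rw [PySem.List.length_sorted]; omega) ≤ q.2)).map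
        (fun q => q.1) := by
  have hslen : (PySem.List.sorted ft (fun x => x) false).length = n := by
    rw [PySem.List.length_sorted]; omega
  set S := PySem.List.sorted ft (fun x => x) false with hS
  set t := S[p]'(by omega) with ht
  set pairsAll := (PySem.List.enumerate ft 0).map (fun q => (q.2, q.1)) with hpairs
  set F := pairsAll.filter (fun y => decide (t ≤ y.1)) with hF
  have hmonoS : ∀ (a b : Nat) (hab : a ≤ b) (hb : b < S.length),
      S[a]'(lt_of_le_of_lt hab hb) ≤ S[b]'hb := fun a b hab hb => pv_sorted_mono ft hab hb
  have hFmap : F.map Prod.snd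
      = ((PySem.List.enumerate ft 0).filter (fun q => decide (t ≤ q.2))).map (fun q => q.1) := by
    rw [hF, hpairs, List.filter_map, List.map_map]
    rfl
  have hOld := pv_surv_eq ft n hn t
  have hOldLen : (((PySem.List.enumerate ft 0).filter (fun q => decide (t ≤ q.2))).map
      (fun q => q.1)).length = n - p := by
    rw [hOld]
    exact pv_count ft n hn p (by rw [PySem.List.length_sorted]; omega) hup
  have hpoolLen : pool.length = n - p := by
    have := hperm.length_eq
    rw [List.length_map, List.length_drop, hslen] at this
    omega
  have hnotmem : ∀ x : Int × Int, ¬ t ≤ x.1 → x ∉ pool := by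
    intro x hx hmem
    have h1 : x.1 ∈ pool.map Prod.fst := List.mem_map_of_mem hmem
    have h2 : x.1 ∈ S.drop p := hperm.mem_iff.mp h1
    obtain ⟨j, hj, hx1⟩ := List.mem_iff_getElem.mp h2
    rw [List.getElem_drop] at hx1
    have hj' := hj
    rw [List.length_drop] at hj'
    have hmono := hmonoS p (p+j) (Nat.le_add_right p j) (by omega)
    exact hx (hx1 ▸ hmono)
  have hFlen : F.length = n - p := by
    have hl := congrArg List.length hFmap
    rw [List.length_map] at hl
    omega
  have hsub : pool.Subperm F := by
    rw [List.subperm_ext_iff]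
    intro x hxmem
    have hx : t ≤ x.1 := by
      by_contra hx
      exact hnotmem x hx hxmem
    have hcf : F.count x = pairsAll.count x := by
      rw [hF, List.count_filter (by simpa using hx)]
    exact le_trans (hcount x) (le_of_eq hcf.symm)
  have hpermF : pool.Perm F := hsub.perm_of_length_le (by omega)
  have hsnd : (((PySem.List.enumerate ft 0).filter (fun q => decide (t ≤ q.2))).map
      (fun q => q.1)).Perm (pool.map Prod.snd) := by
    rw [← hFmap]
    exact (hpermF.map Prod.snd).symm
  have hpw : (((PySem.List.enumerate ft 0).filter (fun q => decide (t ≤ q.2))).map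
      (fun q => q.1)).Pairwise (· ≤ ·) := by
    rw [hOld]
    have h1 : (PySem.List.pyRange 0 (n:Int) 1).Pairwise (· < ·) := by
      have h2 := PySem.List.pairwise_lt_enumerate (xs := ft) (s := 0)
      have h3 : ((PySem.List.enumerate ft 0).map (fun q : Int × Int => q.1)).Pairwise (· < ·) :=
        List.pairwise_map.mpr h2
      rw [PySem.List.map_fst_enumerate] at h3
      rw [show ((0:Int) + ↑ft.length) = (n:Int) by omega] at h3
      exact h3
    exact (h1.filter _).imp le_of_lt
  exact PySem.List.sorted_id_eq_of_perm_of_pairwise _ _ hsnd hpw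

-- the pool loop equals the reference walk over enumerate(sorted(food_times))
theorem pv_bridge (ft : List Int) (n : Nat) (hn : n = ft.length) :
    ∀ (m p : Nat) (rem prev : Int) (pool : List (Int × Int)),
    n - p = m → p ≤ n →
    (pool.map Prod.fst).Perm ((PySem.List.sorted ft (fun x => x) false).drop p) →
    (∀ x : Int × Int,
      pool.count x ≤ ((PySem.List.enumerate ft 0).map (fun q => (q.2, q.1))).count x) →
    (p = 0 → prev = 0) →
    (0 < p → prev = (PySem.List.sorted ft (fun x => x) false).getD (p-1) 0) →
    (0 < p → 0 ≤ rem) →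
    altLoop rem prev pool
    = pvRefLoop ft n ((PySem.List.enumerate (PySem.List.sorted ft (fun x => x) false) 0).drop p) rem prev := by
  have hslen : (PySem.List.sorted ft (fun x => x) false).length = n := by
    rw [PySem.List.length_sorted]; omega
  intro m
  induction m with
  | zero =>
    intro p rem prev pool hm hpn hperm hcount hp0 hppos hrem
    have hpool : pool = [] := by
      have := hperm.length_eq
      rw [List.length_map, List.length_drop, hslen] at this
      exact List.eq_nil_of_length_eq_zero (by omega)
    have hdrop : (PySem.List.enumerate (PySem.List.sorted ft (fun x => x) false) 0).drop p = [] := by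
      apply List.drop_eq_nil_of_le
      rw [PySem.List.length_enumerate, hslen]; omega
    rw [hpool, hdrop]
    simp [altLoop, pvRefLoop]
  | succ m ih =>
    intro p rem prev pool hm hpn hperm hcount hp0 hppos hrem
    have hp : p < n := by omega
    have hpoolLen : pool.length = n - p := by
      have := hperm.length_eq
      rw [List.length_map, List.length_drop, hslen] at this
      omega
    obtain ⟨x, rest, rfl⟩ : ∃ x rest, pool = x :: rest := by
      cases pool with
      | nil => simp at hpoolLen; omega
      | cons a b => exact ⟨a, b, rfl⟩
    rw [List.drop_eq_getElem_cons (show p < (PySem.List.enumerate (PySem.List.sorted ft (fun x => x) false) 0).length by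
      rw [PySem.List.length_enumerate, hslen]; omega)]
    rw [PySem.List.getElem_enumerate]
    set S := PySem.List.sorted ft (fun x => x) false with hS
    have hmonoS : ∀ (a b : Nat) (hab : a ≤ b) (hb : b < S.length),
        S[a]'(lt_of_le_of_lt hab hb) ≤ S[b]'hb := fun a b hab hb => pv_sorted_mono ft hab hb
    set M := pvPoolMin x rest with hM
    have hMmem : M ∈ x :: rest := pvPoolMin_mem rest x
    have hM1 : M.1 = S[p]'(by omega) := by
      have hge : S[p]'(by omega) ≤ M.1 := by
        have h1 : M.1 ∈ (x :: rest).map Prod.fst := List.mem_map_of_mem hMmem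
        have h2 : M.1 ∈ S.drop p := hperm.mem_iff.mp h1
        obtain ⟨j, hj, hx1⟩ := List.mem_iff_getElem.mp h2
        rw [List.getElem_drop] at hx1
        have hj' := hj
        rw [List.length_drop] at hj'
        have hmono := hmonoS p (p+j) (Nat.le_add_right p j) (by omega)
        exact hx1 ▸ hmono
      have hle : M.1 ≤ S[p]'(by omega) := by
        have h1 : S[p]'(by omega) ∈ S.drop p := by
          rw [List.mem_iff_getElem]
          exact ⟨0, by rw [List.length_drop]; omega, by simp [List.getElem_drop]⟩
        have h3 : S[p]'(by omega) ∈ (x :: rest).map Prod.fst := hperm.symm.mem_iff.mp h1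
        obtain ⟨y, hy, hy1⟩ := List.mem_map.mp h3
        exact hy1 ▸ pvPoolMin_le rest x y hy
      omega
    have hlen : ((((x :: rest).length : Nat)) : Int) = (n : Int) - (p : Int) := by
      rw [hpoolLen]; omega
    simp only [altLoop, pvRefLoop, zero_add]
    rw [hM1, hlen]
    split_ifs with hbr
    · -- break: survivors agree
      have hup : ∀ y ∈ S.take p, ¬ S[p]'(by omega) ≤ y := by
        by_cases hpz : p = 0
        · subst hpz; simp
        · have hpp : 0 < p := Nat.pos_of_ne_zero hpz
          have hprev : prev = S.getD (p-1) 0 := hppos hpp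
          have hprev' : prev = S[p-1]'(by omega) := by
            rw [hprev, List.getD_eq_getElem _ _ (by omega)]
          have hrem0 : 0 ≤ rem := hrem hpp
          have hgap : S[p-1]'(by omega) < S[p]'(by omega) := by
            apply pv_gap _ _ rem ((n:Int) - (p:Int)) hrem0 (by omega)
            rw [← hprev']
            exact hbr
          exact pv_hup ft n hn p hpp hp hgap
      rw [pv_pool_surv ft n hn p hp (x :: rest) hperm hcount hup]
    · -- consume the level and remove the minimal pair
      rw [PySem.List.remove?_eq_some_erase _ _ hMmem, Option.getD_some]
      have herase := List.perm_cons_erase hMmem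
      apply ih (p+1) _ _ ((x :: rest).erase M) (by omega) (by omega)
      · -- fst multiset invariant
        have h1 : ((x :: rest).map Prod.fst).Perm (M.1 :: ((x :: rest).erase M).map Prod.fst) := by
          have := herase.map Prod.fst
          simpa using this
        have h2 : S.drop p = S[p]'(by omega) :: S.drop (p+1) := List.drop_eq_getElem_cons (by omega)
        have h3 : (M.1 :: ((x :: rest).erase M).map Prod.fst).Perm (S[p]'(by omega) :: S.drop (p+1)) :=
          (h1.symm.trans hperm).trans (by rw [h2])
        rw [hM1] at h3
        exact h3.cons_inv
      · -- sub-multiset invariant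
        intro y
        exact le_trans ((List.erase_sublist (a := M) (l := x :: rest)).count_le y) (hcount y)
      · omega
      · intro _
        rw [List.getD_eq_getElem _ _ (by omega)]
        simp
      · intro _
        omega

-- ===== VERDICT helpers =====
theorem pv_main (ft : List Int) (k : Int) (hpre : Pre_solution ft k) :
    solution ft k = solution_alt ft k := by
  by_cases hft : ft = []
  · subst hft
    have hk : 0 ≤ k := hpre rfl
    simp only [solution, solution_alt]
    simp only [List.length_nil, Nat.cast_zero]
    rw [PySem.List.pyRange_one_eq_nil (le_refl 0)]
    rw [show PySem.List.sorted ([] : List Int) (fun x => x) false = [] from rfl]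
    show solPost [] [] 0 k (0, 0, false) = altLoop k 0 ((PySem.List.enumerate ([] : List Int) 0).map _)
    rw [PySem.List.enumerate_nil]
    unfold solPost
    rw [if_pos (show ((0:Int), (0:Int), false).1 ≤ k from hk)]
    simp [altLoop]
  · have hn0 : 0 < ft.length := List.length_pos_iff.mpr hft
    have hmain := pv_loop_eq ft k ft.length rfl hn0 ft.length 0 0 0 (by omega) (by omega)
      (fun _ => rfl) (by omega)
    simp only [Nat.cast_zero, List.drop_zero, sub_zero, ↓reduceIte] at hmain
    have hbridge := pv_bridge ft ft.length rfl ft.length 0 k 0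
      ((PySem.List.enumerate ft 0).map (fun q => (q.2, q.1)))
      (by omega) (by omega)
      (by
        have h1 : (((PySem.List.enumerate ft 0).map (fun q => (q.2, q.1))).map Prod.fst) = ft := by
          rw [List.map_map,
            show (Prod.fst ∘ fun q : Int × Int => (q.2, q.1)) = fun q : Int × Int => q.2 from rfl]
          exact PySem.List.map_snd_enumerate ft 0
        rw [List.drop_zero, h1]
        exact (PySem.List.sorted_perm ft (fun x => x) false).symm)
      (fun _ => le_refl _)
      (fun _ => rfl)
      (by omega)
      (by omega)
    simp only [List.drop_zero] at hbridge
    rw [solution, solution_alt]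
    rw [hmain, ← hbridge]

-- ===== VERDICT =====
theorem solution_spec : Claim_equal_solution := by
  unfold Claim_equal_solution
  intro ft k _ hpre
  unfold Spec_solution
  exact pv_main ft k hpre
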